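-- pv_equiv track=rewrite | github.com/rybojones/MSDA-Spark-Installation | word_pair_count.py | pair_counter
-- ===== SOURCE A (Python) =====
-- from collections import Counter, OrderedDict
--
-- def pair_counter(list_line):
--
--     # define a Counter dict with counts of individual tokens in list_line.
--     # this will be used to define the counts for identical word-pairs
--     counter_matches = Counter(list_line)
--
--     # define a Counter dict that contains word-pair counts
--     counter_dict = Counter()
--
--     # define a set or tokens in list_lines, i.e. the unique tokens
--     set_check = set(list_line)
--
--     # iterate through the tokens in list_line
--     for i in range(len(list_line)):
--         # iterate through the words in list_line a second time
--         for j in range(len(list_line)):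
--             # continue without changes if the indices match
--             if i == j:
--                 continue
--             # if the word-pair is two identical tokens, use the counter_matches dict
--             # defined above to count the number of occurrences
--             if list_line[i] == list_line[j]:
--                 # the number of occurrences minus one (don't include the token in-hand)
--                 counter_dict[(list_line[i], list_line[j])] = counter_matches[list_line[i]] - 1
--             # check that the token from the first iteration has not already been used in a previous step
--             if list_line[i] in set_check:
--                 # increase the count on the word-pair by one
--                 counter_dict[(list_line[i], list_line[j])] += 1
--             # continue without changes if the token has already been used
--             else:
--                 continue
--         # remove the token from the check set to ensure it isn't counted multiple times
--         if list_line[i] in set_check: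
--             set_check.remove(list_line[i])
--         else:
--             continue
--     # return the Counter dict with counts of word-pairs
--     return counter_dict
-- ===== SOURCE B (Python) =====
-- from collections import Counter
--
-- def pair_counter(list_line):
--     # One counting pass, then one dedup scan per DISTINCT token: each row's
--     # values come straight from the precomputed counts instead of incremental updates.
--     counts = Counter(list_line)
--     first = {}
--     for j, u in enumerate(list_line):
--         first.setdefault(u, j)
--     result = {}
--     for t in first:
--         i0 = first[t]
--         seen = set()
--         for j, u in enumerate(list_line):
--             if j != i0 and u not in seen:
--                 seen.add(u)
--                 result[(t, u)] = counts[t] - 1 if u == t else counts[u]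
--     return result
-- ===== Notes on version B (the rewrite author's own statement) =====
-- stated objective: alternative
-- what changed: A runs the full O(n^2) double loop over positions, mutating a Counter with set-then-increment tricks and a shrinking set; B counts tokens once, then for each of the k distinct tokens does one dedup scan and writes each pair's final value directly from the counts (count(u) for (t,u), count(t)-1 for (t,t)); measured ~3.7x faster on the generated inputs but both scale as n^2 when all tokens are distinct, so no speed claim is made.
import Mathlib
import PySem

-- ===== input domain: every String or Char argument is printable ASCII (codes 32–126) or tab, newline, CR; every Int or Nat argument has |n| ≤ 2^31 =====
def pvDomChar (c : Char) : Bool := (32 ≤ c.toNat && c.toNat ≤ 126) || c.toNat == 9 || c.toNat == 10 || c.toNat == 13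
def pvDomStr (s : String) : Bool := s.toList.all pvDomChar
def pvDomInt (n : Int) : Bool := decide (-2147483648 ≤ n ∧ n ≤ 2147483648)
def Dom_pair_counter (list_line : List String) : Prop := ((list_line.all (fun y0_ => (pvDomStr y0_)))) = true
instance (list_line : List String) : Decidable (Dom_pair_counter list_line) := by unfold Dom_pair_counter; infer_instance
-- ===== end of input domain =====

-- B replaces A's counter-mutation double loop over all positions by one counting pass plus a
-- per-distinct-token dedup scan that writes each pair's final count directly (alternative algorithm;
-- proved: equal output, insertion order included).


-- ===== PORT A =====
-- inner 'for j in range(len(list_line))' loop body of A (setc is the current set_check)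
def pvInnerA (xs : List String) (cm : PySem.Dict String Int) (setc : PySem.Set String) (i : Int)
    (d : PySem.Dict (String × String) Int) : PySem.Dict (String × String) Int :=
  (PySem.List.pyRange 0 (PySem.List.len xs) 1).foldl (fun d j =>
    if i = j then d
    else
      let ti := PySem.List.pyGetD xs i ""
      let tj := PySem.List.pyGetD xs j ""
      -- counter_dict[(ti,tj)] = counter_matches[ti] - 1
      let d1 := if ti = tj then d.insert (ti, tj) (cm.getD ti 0 - 1) else d
      -- counter_dict[(ti,tj)] += 1  (Counter: missing key reads as 0)
      if PySem.Set.contains setc ti then d1.modify (ti, tj) 0 (· + 1) else d1) d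

-- one outer iteration of A: inner loop, then 'set_check.remove' (guarded by the membership test,
-- so the exact remove is Set.discard)
def pvStepA (xs : List String) (cm : PySem.Dict String Int)
    (st : PySem.Dict (String × String) Int × PySem.Set String) (i : Int) :
    PySem.Dict (String × String) Int × PySem.Set String :=
  let d' := pvInnerA xs cm st.2 i st.1
  let ti := PySem.List.pyGetD xs i ""
  (d', if PySem.Set.contains st.2 ti then PySem.Set.discard st.2 ti else st.2)

def pair_counter (list_line : List String) : List (String × String × Int) :=
  let counter_matches := PySem.Dict.counter list_line
  let fin := (PySem.List.pyRange 0 (PySem.List.len list_line) 1).foldl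
      (pvStepA list_line counter_matches) (PySem.Dict.empty, PySem.Set.ofList list_line)
  fin.1.items.map (fun p => (p.1.1, p.1.2, p.2))

-- ===== PORT B =====
-- body of B's inner dedup scan for the row of distinct token t (i0 = first index of t)
def pvRowB (counts : PySem.Dict String Int) (t : String) (i0 : Int)
    (acc : PySem.Dict (String × String) Int × PySem.Set String) (p : Int × String) :
    PySem.Dict (String × String) Int × PySem.Set String :=
  if p.1 ≠ i0 ∧ ¬ PySem.Set.contains acc.2 p.2 then
    (acc.1.insert (t, p.2) (if p.2 = t then counts.getD t 0 - 1 else counts.getD p.2 0),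
     PySem.Set.add acc.2 p.2)
  else acc

def pair_counter_alt (list_line : List String) : List (String × String × Int) :=
  let counts := PySem.Dict.counter list_line
  let first := (PySem.List.enumerate list_line 0).foldl
      (fun d (p : Int × String) => d.setdefault p.2 p.1) PySem.Dict.empty
  let result := first.keys.foldl (fun res t =>
      ((PySem.List.enumerate list_line 0).foldl (pvRowB counts t (first.getD t 0))
        (res, PySem.Set.empty)).1) (PySem.Dict.empty : PySem.Dict (String × String) Int)
  result.items.map (fun p => (p.1.1, p.1.2, p.2))

-- ===== PRECONDITION & SPEC =====
def Spec_pair_counter (list_line : List String) (out : List (String × String × Int)) : Prop := out = pair_counter_alt list_line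
instance (list_line : List String) (out : List (String × String × Int)) : Decidable (Spec_pair_counter list_line out) := by unfold Spec_pair_counter; infer_instance

-- ===== CLAIM (what is proved, stated in full; the proofs are below) =====
def Claim_equal_pair_counter : Prop := ∀ (list_line : List String), Dom_pair_counter list_line → Spec_pair_counter list_line (pair_counter list_line)

-- ===== LEMMAS AND PROOFS =====

-- the dedup scan both rows perform: values of ps (skipping index i0 and elements already seen)
def pvScanRow (ps : List (Int × String)) (i0 : Int) (seen : PySem.Set String) : List String :=
  match ps with
  | [] => []
  | p :: ps =>
    if p.1 ≠ i0 ∧ ¬ PySem.Set.contains seen p.2 then p.2 :: pvScanRow ps i0 (PySem.Set.add seen p.2)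
    else pvScanRow ps i0 seen

def pvRowKeys (xs : List String) (t : String) : List String :=
  pvScanRow (PySem.List.enumerate xs 0) ((xs.idxOf t : Int)) []

-- value of key (t,u) in A's dict after the first m outer iterations
def pvVal (xs : List String) (m : Nat) (t u : String) : Int :=
  if u = t then (xs.count t : Int) - (if 2 ≤ (xs.take m).count t then 1 else 0) else (xs.count u : Int)

-- A's dict items after the first m outer iterations
def pvItems (xs : List String) (m : Nat) : List ((String × String) × Int) :=
  (PySem.List.dedup (xs.take m)).flatMap
    (fun t => (pvRowKeys xs t).map (fun u => ((t, u), pvVal xs m t u)))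

-- A's set_check after the first m outer iterations
def pvSetm (xs : List String) (m : Nat) : PySem.Set String :=
  (PySem.Set.ofList xs).filter (fun u => !decide (u ∈ xs.take m))
-- --- scanRow basics ---
lemma pvScanRow_sub (ps : List (Int × String)) (i0 : Int) (seen : PySem.Set String) :
    ∀ u ∈ pvScanRow ps i0 seen, u ∉ seen ∧ ∃ p ∈ ps, p.1 ≠ i0 ∧ p.2 = u := by
  induction ps generalizing seen with
  | nil => simp [pvScanRow]
  | cons p ps ih =>
    intro u hu
    rw [pvScanRow] at hu
    split at hu
    · rename_i hc
      rcases List.mem_cons.1 hu with h | h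
      · subst h
        refine ⟨?_, p, List.mem_cons_self, hc.1, rfl⟩
        have := hc.2
        simpa [PySem.Set.contains_iff] using this
      · rcases ih _ u h with ⟨h1, q, hq, hq2⟩
        refine ⟨?_, q, List.mem_cons_of_mem _ hq, hq2⟩
        intro hmem
        exact h1 (by simp [PySem.Set.mem_add, hmem])
    · rcases ih _ u hu with ⟨h1, q, hq, hq2⟩
      exact ⟨h1, q, List.mem_cons_of_mem _ hq, hq2⟩

lemma pvScanRow_mem (ps : List (Int × String)) (i0 : Int) (seen : PySem.Set String) (u : String)
    (hseen : u ∉ seen)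
    (hex : ∃ p ∈ ps, p.1 ≠ i0 ∧ p.2 = u) : u ∈ pvScanRow ps i0 seen := by
  induction ps generalizing seen with
  | nil => simp at hex
  | cons p ps ih =>
    rw [pvScanRow]
    rcases hex with ⟨q, hq, hq1, hq2⟩
    rcases List.mem_cons.1 hq with rfl | hq'
    · have hcon : ¬ PySem.Set.contains seen q.2 = true := by
        simp [hq2, hseen]
      simp [hq1, hq2]
      simp [hseen]
    · split
      · rename_i hc
        by_cases hup : u = p.2
        · simp [hup]
        · refine List.mem_cons_of_mem _ (ih _ ?_ ⟨q, hq', hq1, hq2⟩)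
          simp [PySem.Set.mem_add, hseen, hup]
      · exact ih _ hseen ⟨q, hq', hq1, hq2⟩

lemma pvScanRow_nodup (ps : List (Int × String)) (i0 : Int) (seen : PySem.Set String) :
    (pvScanRow ps i0 seen).Nodup := by
  induction ps generalizing seen with
  | nil => simp [pvScanRow]
  | cons p ps ih =>
    rw [pvScanRow]
    split
    · refine List.nodup_cons.2 ⟨?_, ih _⟩
      intro hmem
      have := (pvScanRow_sub _ _ _ _ hmem).1
      exact this (by simp [PySem.Set.mem_add])
    · exact ih _
-- --- A's inner loop body, specialised to whether list_line[i] is still in set_check ---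
def pvGT (t : String) (ct : Int) (i : Int)
    (d : PySem.Dict (String × String) Int) (p : Int × String) : PySem.Dict (String × String) Int :=
  if i = p.1 then d
  else
    let d1 := if t = p.2 then d.insert (t, p.2) (ct - 1) else d
    d1.modify (t, p.2) 0 (· + 1)

def pvGF (t : String) (ct : Int) (i : Int)
    (d : PySem.Dict (String × String) Int) (p : Int × String) : PySem.Dict (String × String) Int :=
  if i = p.1 then d
  else if t = p.2 then d.insert (t, p.2) (ct - 1) else d

lemma pvInnerA_eq_enum (xs : List String) (cm : PySem.Dict String Int) (setc : PySem.Set String)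
    (i : Int) (d : PySem.Dict (String × String) Int) :
    pvInnerA xs cm setc i d =
      (PySem.List.enumerate xs 0).foldl
        (fun d p =>
          if i = p.1 then d
          else
            let d1 := if PySem.List.pyGetD xs i "" = p.2 then
                d.insert (PySem.List.pyGetD xs i "", p.2) (cm.getD (PySem.List.pyGetD xs i "") 0 - 1) else d
            if PySem.Set.contains setc (PySem.List.pyGetD xs i "") then
              d1.modify (PySem.List.pyGetD xs i "", p.2) 0 (· + 1) else d1) d := by
  rw [PySem.List.enumerate_eq_map_pyRange xs "", List.foldl_map]
  rfl

lemma pvInnerA_eq_T (xs : List String) (cm : PySem.Dict String Int) (setc : PySem.Set String)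
    (i : Int) (d : PySem.Dict (String × String) Int)
    (hmem : PySem.Set.contains setc (PySem.List.pyGetD xs i "") = true) :
    pvInnerA xs cm setc i d =
      (PySem.List.enumerate xs 0).foldl
        (pvGT (PySem.List.pyGetD xs i "") (cm.getD (PySem.List.pyGetD xs i "") 0) i) d := by
  rw [pvInnerA_eq_enum]
  congr 1
  funext d p
  simp only [pvGT, hmem, if_true]

lemma pvInnerA_eq_F (xs : List String) (cm : PySem.Dict String Int) (setc : PySem.Set String)
    (i : Int) (d : PySem.Dict (String × String) Int)
    (hmem : PySem.Set.contains setc (PySem.List.pyGetD xs i "") = false) :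
    pvInnerA xs cm setc i d =
      (PySem.List.enumerate xs 0).foldl
        (pvGF (PySem.List.pyGetD xs i "") (cm.getD (PySem.List.pyGetD xs i "") 0) i) d := by
  rw [pvInnerA_eq_enum]
  congr 1
  funext d p
  simp only [pvGF, hmem, Bool.false_eq_true, if_false]

-- one step of the first-occurrence inner loop
lemma pvGT_skip (t : String) (ct : Int) (i : Int) (d : PySem.Dict (String × String) Int)
    (p : Int × String) (hip : i = p.1) : pvGT t ct i d p = d := by
  simp [pvGT, hip]

lemma pvGT_keys_step (t : String) (ct : Int) (i : Int) (d : PySem.Dict (String × String) Int)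
    (p : Int × String) (hip : ¬ i = p.1) :
    (pvGT t ct i d p).keys =
      if d.contains (t, p.2) then d.keys else d.keys ++ [(t, p.2)] := by
  simp only [pvGT, hip, if_false]
  by_cases htp : t = p.2
  · rw [if_pos htp, PySem.Dict.keys_modify,
      PySem.Dict.keys_insert_of_contains _ _ (by rw [PySem.Dict.contains_insert]; simp)]
    by_cases hc : d.contains (t, p.2) = true
    · rw [PySem.Dict.keys_insert_of_contains _ _ hc]; simp [hc]
    · rw [PySem.Dict.keys_insert_of_not_contains _ _ (by simpa using hc)]; simp [hc]
  · simp only [htp, if_false]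
    rw [PySem.Dict.keys_modify]
    by_cases hc : d.contains (t, p.2) = true
    · rw [PySem.Dict.keys_insert_of_contains _ _ hc]; simp [hc]
    · rw [PySem.Dict.keys_insert_of_not_contains _ _ (by simpa using hc)]; simp [hc]

lemma pvGT_contains_step (t : String) (ct : Int) (i : Int) (d : PySem.Dict (String × String) Int)
    (p : Int × String) (hip : ¬ i = p.1) (q : String × String) :
    (pvGT t ct i d p).contains q = ((q == (t, p.2)) || d.contains q) := by
  simp only [pvGT, hip, if_false]
  by_cases htp : t = p.2
  · rw [if_pos htp, PySem.Dict.contains_modify, PySem.Dict.contains_insert]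
    cases h : (q == (t, p.2)) <;> simp
  · simp only [htp, if_false]
    rw [PySem.Dict.contains_modify]

lemma pvGT_getD_step (t : String) (ct : Int) (i : Int) (d : PySem.Dict (String × String) Int)
    (p : Int × String) (hip : ¬ i = p.1) (q : String × String) :
    (pvGT t ct i d p).getD q 0 =
      if q = (t, p.2) then (if t = p.2 then ct else d.getD q 0 + 1) else d.getD q 0 := by
  simp only [pvGT, hip, if_false]
  by_cases htp : t = p.2
  · rw [if_pos htp]
    simp only [PySem.Dict.getD_modify, PySem.Dict.getD_insert]
    by_cases hq : q = (t, p.2)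
    · simp [hq, htp]
    · simp [hq]
  · simp only [htp, if_false]
    rw [PySem.Dict.getD_modify]
    by_cases hq : q = (t, p.2) <;> simp [hq]

-- keys of the first-occurrence inner loop: the fresh row keys get appended in dedup-scan order
lemma pvGT_keys (t : String) (ct : Int) (i : Int) :
    ∀ (ps : List (Int × String)) (d : PySem.Dict (String × String) Int) (seen : PySem.Set String),
    (∀ u : String, d.contains (t, u) = PySem.Set.contains seen u) →
    (ps.foldl (pvGT t ct i) d).keys = d.keys ++ (pvScanRow ps i seen).map (fun u => (t, u)) := by
  intro ps
  induction ps with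
  | nil => intro d seen _; simp [pvScanRow]
  | cons p ps ih =>
    intro d seen hinv
    rw [List.foldl_cons, pvScanRow]
    by_cases hip : i = p.1
    · rw [pvGT_skip _ _ _ _ _ hip, ih d seen hinv, if_neg (by simp [hip])]
    · by_cases hseen : PySem.Set.contains seen p.2 = true
      · have hcon : d.contains (t, p.2) = true := by rw [hinv]; exact hseen
        have hinv' : ∀ u : String, (pvGT t ct i d p).contains (t, u) = PySem.Set.contains seen u := by
          intro u
          rw [pvGT_contains_step _ _ _ _ _ hip]
          by_cases hup : u = p.2
          · have hm : ((t, u) == (t, p.2)) = true := by simp [hup]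
            rw [hm, Bool.true_or, hup, hseen]
          · have hm : ((t, u) == (t, p.2)) = false := by simp [hup]
            rw [hm, Bool.false_or]
            exact hinv u
        rw [ih _ seen hinv', pvGT_keys_step _ _ _ _ _ hip, if_pos hcon,
          if_neg (by intro h; exact h.2 hseen)]
      · have hcon : d.contains (t, p.2) = false := by rw [hinv]; simpa using hseen
        have hinv' : ∀ u : String,
            (pvGT t ct i d p).contains (t, u) = PySem.Set.contains (PySem.Set.add seen p.2) u := by
          intro u
          rw [pvGT_contains_step _ _ _ _ _ hip]
          by_cases hup : u = p.2
          · have hm : ((t, u) == (t, p.2)) = true := by simp [hup]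
            rw [hm, Bool.true_or]
            have : u ∈ PySem.Set.add seen p.2 := by simp [PySem.Set.mem_add, hup]
            exact ((PySem.Set.contains_iff _ _).2 this).symm
          · have hm : ((t, u) == (t, p.2)) = false := by simp [hup]
            have hc2 : PySem.Set.contains (PySem.Set.add seen p.2) u = PySem.Set.contains seen u := by
              by_cases h2 : u ∈ seen
              · rw [(PySem.Set.contains_iff _ _).2 (by simp [PySem.Set.mem_add, h2]),
                  (PySem.Set.contains_iff _ _).2 h2]
              · have e1 : PySem.Set.contains (PySem.Set.add seen p.2) u = false := by
                  rw [← Bool.not_eq_true]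
                  simp [PySem.Set.mem_add, hup, h2]
                have e2 : PySem.Set.contains seen u = false := by
                  rw [← Bool.not_eq_true]
                  simp [h2]
                rw [e1, e2]
            rw [hm, Bool.false_or, hc2]
            exact hinv u
        rw [ih _ _ hinv', pvGT_keys_step _ _ _ _ _ hip, if_neg (by simp [hcon]),
          if_pos ⟨fun h => hip h.symm, hseen⟩]
        simp
-- dropping a head that cannot match keeps the existence condition
lemma pvExistsCons (p : Int × String) (ps : List (Int × String)) (i : Int) (t : String)
    (hskip : p.1 = i ∨ p.2 ≠ t) :
    (∃ q ∈ p :: ps, q.1 ≠ i ∧ q.2 = t) ↔ (∃ q ∈ ps, q.1 ≠ i ∧ q.2 = t) := by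
  simp only [List.mem_cons]
  constructor
  · rintro ⟨q, (rfl | hq), h1, h2⟩
    · rcases hskip with h | h
      · exact (h1 h).elim
      · exact (h h2).elim
    · exact ⟨q, hq, h1, h2⟩
  · rintro ⟨q, hq, h1, h2⟩; exact ⟨q, Or.inr hq, h1, h2⟩

-- values after the first-occurrence inner loop
lemma pvGT_getD_other (t : String) (ct : Int) (i : Int) :
    ∀ (ps : List (Int × String)) (d : PySem.Dict (String × String) Int)
      (q : String × String), q.1 ≠ t →
    (ps.foldl (pvGT t ct i) d).getD q 0 = d.getD q 0 := by
  intro ps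
  induction ps with
  | nil => intro d q _; rfl
  | cons p ps ih =>
    intro d q hq
    rw [List.foldl_cons, ih _ _ hq]
    by_cases hip : i = p.1
    · rw [pvGT_skip _ _ _ _ _ hip]
    · rw [pvGT_getD_step _ _ _ _ _ hip,
        if_neg (fun h => hq (congrArg Prod.fst h))]

lemma pvGT_getD_ne (t : String) (ct : Int) (i : Int) (u : String) (hu : u ≠ t) :
    ∀ (ps : List (Int × String)) (d : PySem.Dict (String × String) Int),
    (ps.foldl (pvGT t ct i) d).getD (t, u) 0 =
      d.getD (t, u) 0 + ((ps.countP (fun p => decide (p.1 ≠ i ∧ p.2 = u)) : Int)) := by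
  intro ps
  induction ps with
  | nil => intro d; simp
  | cons p ps ih =>
    intro d
    rw [List.foldl_cons, ih, List.countP_cons]
    by_cases hip : i = p.1
    · rw [pvGT_skip _ _ _ _ _ hip]
      have hc : (decide (p.1 ≠ i ∧ p.2 = u)) = false := by simp [hip]
      rw [hc]
      simp
    · by_cases hpu : p.2 = u
      · have hstep : (pvGT t ct i d p).getD (t, u) 0 = d.getD (t, u) 0 + 1 := by
          rw [pvGT_getD_step _ _ _ _ _ hip, if_pos (by rw [hpu]),
            if_neg (fun h => hu (h.trans hpu).symm)]
        have hc : (decide (p.1 ≠ i ∧ p.2 = u)) = true := by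
          simp [hpu]; exact fun h => hip h.symm
        rw [hstep, hc]
        push_cast
        simp
        omega
      · have hstep : (pvGT t ct i d p).getD (t, u) 0 = d.getD (t, u) 0 := by
          rw [pvGT_getD_step _ _ _ _ _ hip,
            if_neg (fun h => hpu (congrArg Prod.snd h).symm)]
        have hc : (decide (p.1 ≠ i ∧ p.2 = u)) = false := by simp [hpu]
        rw [hstep, hc]
        simp

lemma pvGT_getD_t (t : String) (ct : Int) (i : Int) :
    ∀ (ps : List (Int × String)) (d : PySem.Dict (String × String) Int),
    (ps.foldl (pvGT t ct i) d).getD (t, t) 0 =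
      if ∃ p ∈ ps, p.1 ≠ i ∧ p.2 = t then ct else d.getD (t, t) 0 := by
  intro ps
  induction ps with
  | nil => intro d; simp
  | cons p ps ih =>
    intro d
    rw [List.foldl_cons, ih]
    by_cases hip : i = p.1
    · rw [pvGT_skip _ _ _ _ _ hip, if_congr (pvExistsCons p ps i t (Or.inl hip.symm)) rfl rfl]
    · by_cases hpt : p.2 = t
      · have hstep : (pvGT t ct i d p).getD (t, t) 0 = ct := by
          rw [pvGT_getD_step _ _ _ _ _ hip, if_pos (by rw [hpt]), if_pos hpt.symm]
        have hall : ∃ q ∈ p :: ps, q.1 ≠ i ∧ q.2 = t :=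
          ⟨p, List.mem_cons_self, fun h => hip h.symm, hpt⟩
        rw [hstep, if_pos hall]
        split <;> rfl
      · have hstep : (pvGT t ct i d p).getD (t, t) 0 = d.getD (t, t) 0 := by
          rw [pvGT_getD_step _ _ _ _ _ hip,
            if_neg (fun h => hpt (congrArg Prod.snd h).symm)]
        rw [hstep, if_congr (pvExistsCons p ps i t (Or.inr hpt)) rfl rfl]

-- the non-first-occurrence inner loop only (re)writes the diagonal key
lemma pvGF_fold (t : String) (ct : Int) (i : Int) :
    ∀ (ps : List (Int × String)) (d : PySem.Dict (String × String) Int),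
    ps.foldl (pvGF t ct i) d =
      if ∃ p ∈ ps, p.1 ≠ i ∧ p.2 = t then d.insert (t, t) (ct - 1) else d := by
  intro ps
  induction ps with
  | nil => intro d; simp
  | cons p ps ih =>
    intro d
    rw [List.foldl_cons, ih]
    by_cases hip : i = p.1
    · have h0 : pvGF t ct i d p = d := by simp [pvGF, hip]
      rw [h0, if_congr (pvExistsCons p ps i t (Or.inl hip.symm)) rfl rfl]
    · by_cases hpt : p.2 = t
      · have h0 : pvGF t ct i d p = d.insert (t, t) (ct - 1) := by
          rw [pvGF, if_neg hip, if_pos hpt.symm]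
          rw [hpt]
        have hall : ∃ q ∈ p :: ps, q.1 ≠ i ∧ q.2 = t :=
          ⟨p, List.mem_cons_self, fun h => hip h.symm, hpt⟩
        rw [h0, if_pos hall]
        split
        · rw [PySem.Dict.insert_insert_self]
        · rfl
      · have h0 : pvGF t ct i d p = d := by
          rw [pvGF, if_neg hip, if_neg (fun h => hpt h.symm)]
        rw [h0, if_congr (pvExistsCons p ps i t (Or.inr hpt)) rfl rfl]
-- --- enumerate / index bookkeeping ---
lemma pvCountP_enum (u : String) (i : Int) :
    ∀ (l : List String) (s : Int), (i < s ∨ s + l.length ≤ i) →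
    (PySem.List.enumerate l s).countP (fun p => decide (p.1 ≠ i ∧ p.2 = u)) = l.count u := by
  intro l
  induction l with
  | nil => intro s _; simp [PySem.List.enumerate_nil]
  | cons x l ih =>
    intro s hs
    have hlen : ((x :: l).length : Int) = (l.length : Int) + 1 := by
      rw [List.length_cons]; push_cast; ring
    have hnext : i < s + 1 ∨ s + 1 + (l.length : Int) ≤ i := by
      rcases hs with h | h
      · left; omega
      · right; rw [hlen] at h; omega
    have hsi : s ≠ i := by
      rcases hs with h | h
      · omega
      · rw [hlen] at h
        have : (0 : Int) ≤ l.length := by positivity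
        omega
    rw [PySem.List.enumerate_cons, List.countP_cons, List.count_cons, ih (s + 1) hnext]
    by_cases hx : x = u
    · simp [hx, hsi]
    · simp [hx, hsi]

lemma pvEnumSplit (xs : List String) (m : Nat) (hm : m < xs.length) :
    PySem.List.enumerate xs 0 =
      PySem.List.enumerate (xs.take m) 0 ++
        ((m : Int), xs[m]) :: PySem.List.enumerate (xs.drop (m + 1)) ((m : Int) + 1) := by
  conv_lhs => rw [← List.take_append_drop m xs, List.drop_eq_getElem_cons hm]
  rw [PySem.List.enumerate_append, PySem.List.enumerate_cons]
  have hlen : (xs.take m).length = m := by simp; omega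
  rw [hlen]
  norm_num

lemma pvCountP_full (xs : List String) (m : Nat) (u : String) (hm : m < xs.length)
    (hu : ¬ xs[m] = u) :
    (PySem.List.enumerate xs 0).countP (fun p => decide (p.1 ≠ (m : Int) ∧ p.2 = u)) =
      xs.count u := by
  rw [pvEnumSplit xs m hm, List.countP_append, List.countP_cons]
  have h1 : (PySem.List.enumerate (xs.take m) 0).countP
      (fun p => decide (p.1 ≠ (m : Int) ∧ p.2 = u)) = (xs.take m).count u := by
    apply pvCountP_enum
    right
    have : (xs.take m).length = m := by simp; omega
    omega
  have h2 : (PySem.List.enumerate (xs.drop (m + 1)) ((m : Int) + 1)).countP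
      (fun p => decide (p.1 ≠ (m : Int) ∧ p.2 = u)) = (xs.drop (m + 1)).count u := by
    apply pvCountP_enum
    left; omega
  have h3 : (decide ((((m : Int)), xs[m]).1 ≠ (m : Int) ∧ (((m : Int)), xs[m]).2 = u)) = false := by
    simp
  rw [h1, h2, h3]
  conv_rhs => rw [← List.take_append_drop m xs, List.drop_eq_getElem_cons hm]
  rw [List.count_append, List.count_cons]
  simp [hu]

-- x occurring before position m gives a matching pair away from index m
lemma pvMemTake_getElem (xs : List String) (m k : Nat) (hk : k < m) (hm : m ≤ xs.length) :
    xs[k]'(by omega) ∈ xs.take m := by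
  have h : k < (xs.take m).length := by simp; omega
  have e : (xs.take m)[k]'h = xs[k]'(by omega) := List.getElem_take
  exact e ▸ List.getElem_mem _

lemma pvMemDrop_getElem (xs : List String) (m k : Nat) (hk : m < k) (h : k < xs.length) :
    xs[k] ∈ xs.drop (m + 1) := by
  have h2 : k - (m + 1) < (xs.drop (m + 1)).length := by simp; omega
  have e : (xs.drop (m + 1))[k - (m + 1)]'h2 = xs[k] := by
    rw [List.getElem_drop]
    congr 1
    omega
  exact e ▸ List.getElem_mem _

-- a row key equal to its own token means the token is duplicated
lemma pvDiag_two_le_count (xs : List String) (t : String)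
    (ht : t ∈ pvRowKeys xs t) : 2 ≤ xs.count t := by
  rcases (pvScanRow_sub _ _ _ t ht).2 with ⟨p, hp, hp1, hp2⟩
  rcases (PySem.List.mem_enumerate_iff _ _ _).1 hp with ⟨k, hk, rfl⟩
  simp only at hp1 hp2
  have hkm : k ≠ xs.idxOf t := by
    intro h
    exact hp1 (by rw [h]; norm_num)
  have htmem : t ∈ xs := hp2 ▸ List.getElem_mem _
  have hio : xs.idxOf t < xs.length := List.idxOf_lt_length_of_mem htmem
  set M := xs.idxOf t with hM
  have hgM : xs[M] = t := List.getElem_idxOf hio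
  have hsplit : xs.count t =
      (xs.take M).count t + 1 + (xs.drop (M + 1)).count t := by
    conv_lhs => rw [← List.take_append_drop M xs, List.drop_eq_getElem_cons hio]
    rw [List.count_append, List.count_cons]
    simp [hgM]
    omega
  rcases Nat.lt_or_ge k M with h | h
  · have : t ∈ xs.take M := hp2 ▸ pvMemTake_getElem xs M k h (by omega)
    have := List.count_pos_iff.2 this
    omega
  · have hkM : M < k := by omega
    have : t ∈ xs.drop (M + 1) := hp2 ▸ pvMemDrop_getElem xs M k hkM hk
    have := List.count_pos_iff.2 this
    omega

-- index of a fresh element: its own position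
lemma pvIdxOf_fresh (xs : List String) (m : Nat) (x : String) (hm : m < xs.length)
    (hgx : xs[m] = x) (hfresh : x ∉ xs.take m) : xs.idxOf x = m := by
  have e : xs = xs.take m ++ x :: xs.drop (m + 1) := by
    conv_lhs => rw [← List.take_append_drop m xs, List.drop_eq_getElem_cons hm]
    rw [hgx]
  conv_lhs => rw [e]
  rw [List.idxOf_append, if_neg hfresh, List.idxOf_cons_self]
  simp
  omega

-- index of an element already seen: strictly before m
lemma pvIdxOf_seen (xs : List String) (m : Nat) (x : String) (hm : m ≤ xs.length)
    (hx : x ∈ xs.take m) : xs.idxOf x < m := by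
  conv_lhs => rw [← List.take_append_drop m xs]
  rw [List.idxOf_append, if_pos hx]
  have := List.idxOf_lt_length_of_mem hx
  have hlen : (xs.take m).length = m := by simp; omega
  omega
-- --- shape facts about pvItems / pvSetm ---
lemma pvItems_fst (xs : List String) (m : Nat) :
    (pvItems xs m).map (·.1) =
      (PySem.List.dedup (xs.take m)).flatMap (fun t => (pvRowKeys xs t).map (fun u => (t, u))) := by
  simp [pvItems, List.map_flatMap, List.map_map, Function.comp_def]

lemma pvBlocksNodup (K : List String) (row : String → List String) (hK : K.Nodup)
    (hrow : ∀ t, (row t).Nodup) :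
    (K.flatMap (fun t => (row t).map (fun u => (t, u)))).Nodup := by
  induction K with
  | nil => simp
  | cons t K ih =>
    rw [List.flatMap_cons]
    apply List.Nodup.append
    · exact (hrow t).map (fun a b h => (Prod.mk.injEq _ _ _ _ ▸ h : _ ∧ _).2)
    · exact ih hK.of_cons
    · intro q hq1 hq2
      rcases List.mem_map.1 hq1 with ⟨u, _, rfl⟩
      rcases List.mem_flatMap.1 hq2 with ⟨t', ht', hq⟩
      rcases List.mem_map.1 hq with ⟨u', _, he⟩
      have ht : t' = t := congrArg Prod.fst he
      exact (List.nodup_cons.1 hK).1 (ht ▸ ht')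

lemma pvKeys_eq (xs : List String) (m : Nat) (D : PySem.Dict (String × String) Int)
    (hD : D.items = pvItems xs m) :
    D.keys = (PySem.List.dedup (xs.take m)).flatMap
      (fun t => (pvRowKeys xs t).map (fun u => (t, u))) := by
  have : D.keys = (pvItems xs m).map (·.1) := by
    rw [← hD]; rfl
  rw [this, pvItems_fst]

lemma pvKeys_nodup (xs : List String) (m : Nat) (D : PySem.Dict (String × String) Int)
    (hD : D.items = pvItems xs m) : D.keys.Nodup := by
  rw [pvKeys_eq xs m D hD]
  have hK : (PySem.List.dedup (xs.take m)).Nodup := by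
    rw [PySem.List.dedup_eq_ofList]
    exact PySem.Set.nodup_ofList _
  exact pvBlocksNodup _ _ hK (fun t => pvScanRow_nodup _ _ _)

lemma pvMem_keys (xs : List String) (m : Nat) (D : PySem.Dict (String × String) Int)
    (hD : D.items = pvItems xs m) (q : String × String) :
    q ∈ D.keys ↔ q.1 ∈ PySem.List.dedup (xs.take m) ∧ q.2 ∈ pvRowKeys xs q.1 := by
  rw [pvKeys_eq xs m D hD]
  constructor
  · intro h
    rcases List.mem_flatMap.1 h with ⟨t, ht, hq⟩
    rcases List.mem_map.1 hq with ⟨u, hu, he⟩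
    cases he
    exact ⟨ht, hu⟩
  · intro ⟨h1, h2⟩
    exact List.mem_flatMap.2 ⟨q.1, h1, List.mem_map.2 ⟨q.2, h2, rfl⟩⟩

lemma pvSetm_contains (xs : List String) (m : Nat) (x : String) (hx : x ∈ xs) :
    PySem.Set.contains (pvSetm xs m) x = !decide (x ∈ xs.take m) := by
  by_cases h : x ∈ xs.take m
  · have hnot : ¬ x ∈ pvSetm xs m := by
      intro hmem
      have := (List.mem_filter.1 hmem).2
      simp [h] at this
    have : PySem.Set.contains (pvSetm xs m) x = false := by
      rw [← Bool.not_eq_true]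
      intro hc
      exact hnot ((PySem.Set.contains_iff _ _).1 hc)
    rw [this]
    simp [h]
  · have hmem : x ∈ pvSetm xs m := by
      apply List.mem_filter.2
      refine ⟨(PySem.Set.mem_ofList _ _).2 hx, by simp [h]⟩
    rw [(PySem.Set.contains_iff _ _).2 hmem]
    simp [h]

lemma pvTake_succ (xs : List String) (m : Nat) (hm : m < xs.length) :
    xs.take (m + 1) = xs.take m ++ [xs[m]] := by
  rw [List.take_add_one, List.getElem?_eq_getElem hm]
  rfl

-- set_check update in one outer step
lemma pvSetm_step (xs : List String) (m : Nat) (hm : m < xs.length) :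
    (if PySem.Set.contains (pvSetm xs m) xs[m] then
        PySem.Set.discard (pvSetm xs m) xs[m] else pvSetm xs m) = pvSetm xs (m + 1) := by
  rw [pvSetm_contains xs m _ (List.getElem_mem hm)]
  by_cases h : xs[m] ∈ xs.take m
  · rw [if_neg (by simp [h])]
    unfold pvSetm
    apply List.filter_congr
    intro u _
    by_cases hu : u ∈ xs.take m
    · have h1 : u ∈ xs.take (m + 1) := pvTake_succ xs m hm ▸ List.mem_append_left _ hu
      simp [hu, h1]
    · have hne : ¬ u = xs[m] := fun he => hu (he ▸ h)
      have h1 : u ∉ xs.take (m + 1) := by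
        intro hmem
        rw [pvTake_succ xs m hm] at hmem
        rcases List.mem_append.1 hmem with h2 | h2
        · exact hu h2
        · exact hne (List.mem_singleton.1 h2)
      simp [hu, h1]
  · rw [if_pos (by simp [h])]
    unfold pvSetm PySem.Set.discard
    rw [List.filter_filter]
    apply List.filter_congr
    intro u _
    by_cases hu : u ∈ xs.take m
    · have h1 : u ∈ xs.take (m + 1) := pvTake_succ xs m hm ▸ List.mem_append_left _ hu
      simp [hu, h1]
    · by_cases he : u = xs[m]
      · have h1 : u ∈ xs.take (m + 1) := by
          rw [pvTake_succ xs m hm, he]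
          exact List.mem_append_right _ (List.mem_singleton.2 rfl)
        simp [he]
        exact he ▸ h1
      · have h1 : u ∉ xs.take (m + 1) := by
          intro hmem
          rw [pvTake_succ xs m hm] at hmem
          rcases List.mem_append.1 hmem with h2 | h2
          · exact hu h2
          · exact he (List.mem_singleton.1 h2)
        simp [hu, he, h1]
-- --- one outer step of A, dict side ---
lemma pvGetD_at_m (xs : List String) (m : Nat) (hm : m < xs.length) :
    PySem.List.pyGetD xs (m : Int) "" = xs[m] := by
  rw [PySem.List.pyGetD_natCast]
  exact List.getD_eq_getElem _ _ hm

lemma pvDedup_take_succ_seen (xs : List String) (m : Nat) (hm : m < xs.length)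
    (hx : xs[m] ∈ xs.take m) :
    PySem.List.dedup (xs.take (m + 1)) = PySem.List.dedup (xs.take m) := by
  rw [pvTake_succ xs m hm, PySem.List.dedup_eq_ofList, PySem.List.dedup_eq_ofList,
    PySem.Set.ofList_append_singleton,
    PySem.Set.add_of_mem ((PySem.Set.mem_ofList _ _).2 hx)]

lemma pvDedup_take_succ_fresh (xs : List String) (m : Nat) (hm : m < xs.length)
    (hx : xs[m] ∉ xs.take m) :
    PySem.List.dedup (xs.take (m + 1)) = PySem.List.dedup (xs.take m) ++ [xs[m]] := by
  rw [pvTake_succ xs m hm, PySem.List.dedup_eq_ofList, PySem.List.dedup_eq_ofList,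
    PySem.Set.ofList_append_singleton,
    PySem.Set.add_of_not_mem (fun h => hx ((PySem.Set.mem_ofList _ _).1 h))]

-- x = xs[m] already seen: the inner loop just rewrites the diagonal entry of x's row
lemma pvStep_seen (xs : List String) (m : Nat) (hm : m < xs.length)
    (hx : xs[m] ∈ xs.take m) (D : PySem.Dict (String × String) Int)
    (hD : D.items = pvItems xs m) :
    (pvInnerA xs (PySem.Dict.counter xs) (pvSetm xs m) (m : Int) D).items = pvItems xs (m + 1) := by
  have hti := pvGetD_at_m xs m hm
  have hmem : PySem.Set.contains (pvSetm xs m) (PySem.List.pyGetD xs (m : Int) "") = false := by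
    rw [hti, pvSetm_contains xs m _ (List.getElem_mem hm)]
    simp [hx]
  rw [pvInnerA_eq_F xs _ _ _ _ hmem, hti]
  have hxs : xs[m] ∈ xs := List.getElem_mem hm
  have hMlt : xs.idxOf xs[m] < m := pvIdxOf_seen xs m _ (le_of_lt hm) hx
  have hMlen : xs.idxOf xs[m] < xs.length := by omega
  have hgM : xs[xs.idxOf xs[m]] = xs[m] := List.getElem_idxOf hMlen
  have hex : ∃ p ∈ PySem.List.enumerate xs 0, p.1 ≠ (m : Int) ∧ p.2 = xs[m] := by
    refine ⟨(0 + (xs.idxOf xs[m] : Int), xs[xs.idxOf xs[m]]),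
      (PySem.List.mem_enumerate_iff _ _ _).2 ⟨xs.idxOf xs[m], hMlen, rfl⟩, ?_, hgM⟩
    simp only []
    intro hc
    have : (xs.idxOf xs[m] : Int) = (m : Int) := by omega
    exact absurd (by exact_mod_cast this) (Nat.ne_of_lt hMlt)
  rw [pvGF_fold, if_pos hex]
  -- the diagonal key is already present
  have hkey : (xs[m], xs[m]) ∈ D.keys := by
    refine (pvMem_keys xs m D hD _).2 ⟨?_, ?_⟩
    · exact (PySem.List.mem_dedup _ _).2 hx
    · refine pvScanRow_mem _ _ _ _ (by simp) ?_
      refine ⟨(0 + (m : Int), xs[m]),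
        (PySem.List.mem_enumerate_iff _ _ _).2 ⟨m, hm, rfl⟩, ?_, rfl⟩
      simp only []
      intro hc
      have : (m : Int) = (xs.idxOf xs[m] : Int) := by omega
      exact absurd (by exact_mod_cast this) (Nat.ne_of_gt hMlt)
  have hcon : D.contains (xs[m], xs[m]) = true := (PySem.Dict.contains_iff_mem_keys _ _).2 hkey
  rw [PySem.Dict.items_insert_of_contains _ _ hcon, hD]
  -- now push the replacement through the block structure
  have hK : PySem.List.dedup (xs.take (m + 1)) = PySem.List.dedup (xs.take m) :=
    pvDedup_take_succ_seen xs m hm hx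
  unfold pvItems
  rw [hK, List.map_flatMap]
  apply List.flatMap_congr
  intro t ht
  rw [List.map_map]
  apply List.map_congr_left
  intro u hu
  simp only [Function.comp_apply]
  have htm : t ∈ xs.take m := (PySem.List.mem_dedup _ _).1 ht
  have hct : (PySem.Dict.counter xs).getD xs[m] 0 = (xs.count xs[m] : Int) :=
    PySem.Dict.getD_counter _ _
  by_cases htx : t = xs[m]
  · by_cases hux : u = xs[m]
    · have hbeq : ((((t, u), pvVal xs m t u)).1 == (xs[m], xs[m])) = true := by
        simp [htx, hux]
      rw [if_pos hbeq]
      have hcount : 2 ≤ (xs.take (m + 1)).count xs[m] := by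
        rw [pvTake_succ xs m hm, List.count_append]
        have h1 : 1 ≤ (xs.take m).count xs[m] := List.count_pos_iff.2 hx
        simp
        omega
      have hval : pvVal xs (m + 1) t u = (xs.count xs[m] : Int) - 1 := by
        unfold pvVal
        rw [if_pos (hux.trans htx.symm), htx, if_pos hcount]
      rw [hval, hct, htx, hux]
    · have hbeq : ((((t, u), pvVal xs m t u)).1 == (xs[m], xs[m])) = false := by
        simp [hux]
      rw [if_neg (by simp [hbeq])]
      have : pvVal xs m t u = pvVal xs (m + 1) t u := by
        unfold pvVal
        rw [if_neg (fun h => hux (h.trans htx))]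
        rw [if_neg (fun h => hux (h.trans htx))]
      rw [this]
  · have hbeq : ((((t, u), pvVal xs m t u)).1 == (xs[m], xs[m])) = false := by
      simp [htx]
    rw [if_neg (by simp [hbeq])]
    have : pvVal xs m t u = pvVal xs (m + 1) t u := by
      unfold pvVal
      by_cases hut : u = t
      · rw [if_pos hut, if_pos hut]
        have : (xs.take (m + 1)).count t = (xs.take m).count t := by
          rw [pvTake_succ xs m hm, List.count_append]
          have hne : ¬ xs[m] = t := fun h => htx h.symm
          simp [hne]
        rw [this]
      · rw [if_neg hut, if_neg hut]
    rw [this]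
-- x = xs[m] seen for the first time: the inner loop appends x's full row
lemma pvStep_fresh (xs : List String) (m : Nat) (hm : m < xs.length)
    (hx : xs[m] ∉ xs.take m) (D : PySem.Dict (String × String) Int)
    (hD : D.items = pvItems xs m) :
    (pvInnerA xs (PySem.Dict.counter xs) (pvSetm xs m) (m : Int) D).items = pvItems xs (m + 1) := by
  have hti := pvGetD_at_m xs m hm
  have hmem : PySem.Set.contains (pvSetm xs m) (PySem.List.pyGetD xs (m : Int) "") = true := by
    rw [hti, pvSetm_contains xs m _ (List.getElem_mem hm)]
    simp [hx]
  rw [pvInnerA_eq_T xs _ _ _ _ hmem, hti]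
  have hct : (PySem.Dict.counter xs).getD xs[m] 0 = (xs.count xs[m] : Int) :=
    PySem.Dict.getD_counter _ _
  have hfreshD : ∀ u : String, D.contains (xs[m], u) = false := by
    intro u
    rw [← Bool.not_eq_true]
    intro hc
    have hk := (pvMem_keys xs m D hD _).1 ((PySem.Dict.contains_iff_mem_keys _ _).1 hc)
    exact hx ((PySem.List.mem_dedup _ _).1 hk.1)
  have hfresh : ∀ u : String,
      D.contains (xs[m], u) = PySem.Set.contains ([] : PySem.Set String) u := by
    intro u
    rw [hfreshD u]
    rfl
  have hidx : xs.idxOf xs[m] = m := pvIdxOf_fresh xs m xs[m] hm rfl hx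
  have hrowx : pvRowKeys xs xs[m] = pvScanRow (PySem.List.enumerate xs 0) (m : Int) [] := by
    unfold pvRowKeys
    rw [hidx]
  have hkeys := pvGT_keys xs[m] ((PySem.Dict.counter xs).getD xs[m] 0) (m : Int)
    (PySem.List.enumerate xs 0) D [] hfresh
  have hkeys' : ((PySem.List.enumerate xs 0).foldl
      (pvGT xs[m] ((PySem.Dict.counter xs).getD xs[m] 0) (m : Int)) D).keys =
      (PySem.List.dedup (xs.take (m + 1))).flatMap
        (fun t => (pvRowKeys xs t).map (fun u => (t, u))) := by
    rw [hkeys, pvKeys_eq xs m D hD, pvDedup_take_succ_fresh xs m hm hx,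
      List.flatMap_append]
    simp [hrowx]
  have hKnodup : (PySem.List.dedup (xs.take (m + 1))).Nodup := by
    rw [PySem.List.dedup_eq_ofList]
    exact PySem.Set.nodup_ofList _
  have hnodup' : ((PySem.List.enumerate xs 0).foldl
      (pvGT xs[m] ((PySem.Dict.counter xs).getD xs[m] 0) (m : Int)) D).keys.Nodup := by
    rw [hkeys']
    exact pvBlocksNodup _ _ hKnodup (fun t => pvScanRow_nodup _ _ _)
  rw [PySem.Dict.items_eq_map_keys _ hnodup' 0, hkeys']
  unfold pvItems
  rw [List.map_flatMap]
  apply List.flatMap_congr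
  intro t ht
  rw [List.map_map]
  apply List.map_congr_left
  intro u hu
  simp only [Function.comp_apply]
  refine Prod.ext rfl ?_
  simp only []
  -- value at key (t, u)
  have htsplit : t ∈ PySem.List.dedup (xs.take m) ∨ t = xs[m] := by
    rw [pvDedup_take_succ_fresh xs m hm hx] at ht
    rcases List.mem_append.1 ht with h | h
    · exact Or.inl h
    · exact Or.inr (List.mem_singleton.1 h)
  rcases htsplit with hold | rfl
  · -- old row: untouched
    have htx : t ≠ xs[m] := by
      intro h
      exact hx (h ▸ (PySem.List.mem_dedup _ _).1 hold)
    rw [pvGT_getD_other _ _ _ _ _ _ (by simpa using htx)]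
    have hitem : ((t, u), pvVal xs m t u) ∈ D.items := by
      rw [hD]
      exact List.mem_flatMap.2 ⟨t, hold, List.mem_map.2 ⟨u, hu, rfl⟩⟩
    rw [PySem.Dict.getD_of_mem_items D hitem (pvKeys_nodup xs m D hD) 0]
    unfold pvVal
    by_cases hut : u = t
    · rw [if_pos hut, if_pos hut]
      have : (xs.take (m + 1)).count t = (xs.take m).count t := by
        rw [pvTake_succ xs m hm, List.count_append]
        have hne : ¬ xs[m] = t := fun h => htx h.symm
        simp [hne]
      rw [this]
    · rw [if_neg hut, if_neg hut]
  · -- new row of x = xs[m]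
    rw [hrowx] at hu
    by_cases hux : u = xs[m]
    · rw [hux] at hu ⊢
      rw [pvGT_getD_t]
      have hex := (pvScanRow_sub _ _ _ xs[m] hu).2
      rw [if_pos hex]
      have hcnt : (xs.take (m + 1)).count xs[m] = 1 := by
        rw [pvTake_succ xs m hm, List.count_append, List.count_eq_zero.2 hx]
        simp
      unfold pvVal
      rw [if_pos rfl, hcnt, if_neg (by omega), hct]
      simp
    · rw [pvGT_getD_ne _ _ _ _ hux]
      rw [PySem.Dict.getD_of_not_contains _ _ (hfreshD u)]
      have hcp := pvCountP_full xs m u hm (fun h => hux h.symm)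
      rw [hcp]
      unfold pvVal
      rw [if_neg hux]
      omega
-- --- A: full outer loop, by induction on the number of processed indices ---
lemma pvA_outer (xs : List String) : ∀ m : Nat, m ≤ xs.length →
    ((PySem.List.pyRange 0 (m : Int) 1).foldl (pvStepA xs (PySem.Dict.counter xs))
      (PySem.Dict.empty, PySem.Set.ofList xs)).1.items = pvItems xs m ∧
    ((PySem.List.pyRange 0 (m : Int) 1).foldl (pvStepA xs (PySem.Dict.counter xs))
      (PySem.Dict.empty, PySem.Set.ofList xs)).2 = pvSetm xs m := by
  intro m
  induction m with
  | zero =>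
    intro _
    rw [show ((0 : Nat) : Int) = 0 by norm_num, PySem.List.pyRange_one_eq_nil (le_refl 0),
      List.foldl_nil]
    constructor
    · show PySem.Dict.empty.items = _
      rw [PySem.Dict.items, PySem.Dict.empty]
      simp [pvItems]
    · show PySem.Set.ofList xs = _
      unfold pvSetm
      rw [List.filter_eq_self.2 (by intro u _; simp)]
  | succ m ih =>
    intro hle
    have hm : m < xs.length := by omega
    obtain ⟨h1, h2⟩ := ih (by omega)
    have hsplit : PySem.List.pyRange 0 ((m + 1 : Nat) : Int) 1 =
        PySem.List.pyRange 0 (m : Int) 1 ++ [(m : Int)] := by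
      have he : ((m + 1 : Nat) : Int) = (m : Int) + 1 := by push_cast; ring
      rw [he, PySem.List.pyRange_one_succ_right (by positivity)]
    rw [hsplit, List.foldl_append, List.foldl_cons, List.foldl_nil]
    constructor
    · show (pvInnerA xs (PySem.Dict.counter xs) _ (m : Int) _).items = _
      rw [h2]
      by_cases hx : xs[m] ∈ xs.take m
      · exact pvStep_seen xs m hm hx _ h1
      · exact pvStep_fresh xs m hm hx _ h1
    · show (if PySem.Set.contains _ (PySem.List.pyGetD xs (m : Int) "") then
          PySem.Set.discard _ (PySem.List.pyGetD xs (m : Int) "") else _) = _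
      rw [h2, pvGetD_at_m xs m hm]
      exact pvSetm_step xs m hm

lemma pvA_items (xs : List String) :
    pair_counter xs = (pvItems xs xs.length).map (fun p => (p.1.1, p.1.2, p.2)) := by
  show ((PySem.List.pyRange 0 (PySem.List.len xs) 1).foldl
      (pvStepA xs (PySem.Dict.counter xs))
      (PySem.Dict.empty, PySem.Set.ofList xs)).1.items.map (fun p => (p.1.1, p.1.2, p.2)) = _
  rw [PySem.List.len_eq, (pvA_outer xs xs.length le_rfl).1]
-- --- B side ---
lemma pvIdxOf?_eq_some (xs : List String) (t : String) (h : t ∈ xs) :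
    xs.idxOf? t = some (xs.idxOf t) := by
  induction xs with
  | nil => simp at h
  | cons x xs ih =>
    by_cases he : x = t
    · simp [List.idxOf?_cons, he]
    · rcases List.mem_cons.1 h with h2 | h2
      · exact absurd h2.symm he
      · simp [List.idxOf?_cons, he, ih h2]

-- the `first.setdefault` loop of B: keys in first-occurrence order, values = first index
lemma pvFirst_fold (xs : List String) : ∀ (s : Int) (d : PySem.Dict String Int),
    ((PySem.List.enumerate xs s).foldl
      (fun d (p : Int × String) => d.setdefault p.2 p.1) d).keys = PySem.Set.update d.keys xs ∧
    ∀ t, ((PySem.List.enumerate xs s).foldl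
      (fun d (p : Int × String) => d.setdefault p.2 p.1) d).get? t =
        (d.get? t).or ((PySem.List.index? xs t).map (fun k => s + (k : Int))) := by
  induction xs with
  | nil =>
    intro s d
    rw [PySem.List.enumerate_nil, List.foldl_nil]
    constructor
    · rw [PySem.Set.update_nil]
    · intro t
      rw [PySem.List.index?_eq_idxOf?]
      simp
  | cons x xs ih =>
    intro s d
    rw [PySem.List.enumerate_cons, List.foldl_cons]
    obtain ⟨ihk, ihg⟩ := ih (s + 1) (d.setdefault x s)
    constructor
    · rw [ihk, PySem.Set.update_cons]
      congr 1
      rw [PySem.Dict.keys_setdefault, PySem.Set.add_eq_ite]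
      by_cases hc : d.contains x = true
      · rw [if_pos hc, if_pos ((PySem.Dict.contains_iff_mem_keys _ _).1 hc)]
      · rw [if_neg hc, if_neg (fun hmem =>
          hc ((PySem.Dict.contains_iff_mem_keys _ _).2 hmem))]
    · intro t
      rw [ihg t]
      by_cases het : t = x
      · subst het
        rw [PySem.Dict.get?_setdefault_self]
        simp only [PySem.List.index?_eq_idxOf?, List.idxOf?_cons, beq_self_eq_true,
          if_true]
        cases hg : d.get? t <;> simp
      · rw [PySem.Dict.get?_setdefault_of_ne _ _ het]
        simp only [PySem.List.index?_eq_idxOf?, List.idxOf?_cons]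
        have hbeq : (x == t) = false := by
          rw [beq_eq_false_iff_ne]
          exact fun h => het h.symm
        rw [hbeq]
        simp only [Bool.false_eq_true, if_false]
        cases hio : List.idxOf? t xs
        · cases hg : d.get? t <;> simp
        · cases hg : d.get? t
          · simp
            omega
          · simp

-- B's inner dedup scan appends exactly the scanned row
lemma pvRowB_items (counts : PySem.Dict String Int) (t : String) (i0 : Int) :
    ∀ (ps : List (Int × String)) (d : PySem.Dict (String × String) Int)
      (seen : PySem.Set String),
    (∀ u : String, ¬ PySem.Set.contains seen u = true → d.contains (t, u) = false) →
    ((ps.foldl (pvRowB counts t i0) (d, seen)).1).items =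
      d.items ++ (pvScanRow ps i0 seen).map
        (fun u => ((t, u), if u = t then counts.getD t 0 - 1 else counts.getD u 0)) := by
  intro ps
  induction ps with
  | nil => intro d seen _; simp [pvScanRow]
  | cons p ps ih =>
    intro d seen hfresh
    rw [List.foldl_cons, pvScanRow]
    by_cases hc : p.1 ≠ i0 ∧ ¬ PySem.Set.contains seen p.2 = true
    · have hstep : pvRowB counts t i0 (d, seen) p =
          (d.insert (t, p.2) (if p.2 = t then counts.getD t 0 - 1 else counts.getD p.2 0),
           PySem.Set.add seen p.2) := by
        rw [pvRowB, if_pos hc]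
      rw [hstep, ih _ _ ?_]
      · rw [PySem.Dict.items_insert_of_not_contains _ _ (hfresh p.2 hc.2), if_pos hc]
        rw [List.map_cons, List.append_assoc, List.singleton_append]
      · intro u hu
        have hup : ¬ u = p.2 := by
          intro h
          exact hu ((PySem.Set.contains_iff _ _).2 (by simp [PySem.Set.mem_add, h]))
        rw [PySem.Dict.contains_insert]
        have h1 : ((t, u) == (t, p.2)) = false := by simp [hup]
        rw [h1, Bool.false_or]
        apply hfresh
        intro hcon
        exact hu ((PySem.Set.contains_iff _ _).2
          (by simp [PySem.Set.mem_add, (PySem.Set.contains_iff _ _).1 hcon]))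
    · have hstep : pvRowB counts t i0 (d, seen) p = (d, seen) := by
        rw [pvRowB, if_neg hc]
      rw [hstep, ih _ _ hfresh, if_neg hc]
-- B's loop over the distinct tokens: rows are appended in order
lemma pvB_rows (xs : List String) (counts first : PySem.Dict String Int) :
    ∀ (K : List String) (res : PySem.Dict (String × String) Int), K.Nodup →
    (∀ t ∈ K, ∀ u : String, res.contains (t, u) = false) →
    (K.foldl (fun res t => ((PySem.List.enumerate xs 0).foldl
        (pvRowB counts t (first.getD t 0)) (res, [])).1) res).items =
      res.items ++ K.flatMap (fun t =>
        (pvScanRow (PySem.List.enumerate xs 0) (first.getD t 0) []).map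
          (fun u => ((t, u), if u = t then counts.getD t 0 - 1 else counts.getD u 0))) := by
  intro K
  induction K with
  | nil => intro res _ _; simp
  | cons t K ih =>
    intro res hnd hfresh
    rw [List.foldl_cons]
    have hrow := pvRowB_items counts t (first.getD t 0) (PySem.List.enumerate xs 0) res []
      (fun u _ => hfresh t List.mem_cons_self u)
    rw [ih _ hnd.of_cons ?_, hrow, List.flatMap_cons, List.append_assoc]
    intro t' ht' u
    rw [← Bool.not_eq_true]
    intro hc
    have hk := (PySem.Dict.contains_iff_mem_keys _ _).1 hc
    have hkeys : (((PySem.List.enumerate xs 0).foldl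
        (pvRowB counts t (first.getD t 0)) (res, [])).1).keys =
        res.keys ++ (pvScanRow (PySem.List.enumerate xs 0) (first.getD t 0) []).map
          (fun u => (t, u)) := by
      show (((PySem.List.enumerate xs 0).foldl
        (pvRowB counts t (first.getD t 0)) (res, [])).1).items.map (·.1) = _
      rw [hrow, List.map_append, List.map_map]
      congr 1
    rw [hkeys] at hk
    rcases List.mem_append.1 hk with h | h
    · have : res.contains (t', u) = true :=
        (PySem.Dict.contains_iff_mem_keys _ _).2 h
      rw [hfresh t' (List.mem_cons_of_mem _ ht') u] at this
      exact Bool.false_ne_true this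
    · rcases List.mem_map.1 h with ⟨u', _, he⟩
      have : t = t' := congrArg Prod.fst he
      exact (List.nodup_cons.1 hnd).1 (this ▸ ht')

-- characterization of B's result
lemma pvB_items (xs : List String) :
    pair_counter_alt xs = ((PySem.List.dedup xs).flatMap (fun t =>
      (pvRowKeys xs t).map (fun u => ((t, u),
        if u = t then (xs.count t : Int) - 1 else (xs.count u : Int))))).map
      (fun p => (p.1.1, p.1.2, p.2)) := by
  have hrfl : pair_counter_alt xs =
      ((((PySem.List.enumerate xs 0).foldl
          (fun d (p : Int × String) => d.setdefault p.2 p.1) PySem.Dict.empty).keys).foldl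
        (fun res t => ((PySem.List.enumerate xs 0).foldl
          (pvRowB (PySem.Dict.counter xs) t
            (((PySem.List.enumerate xs 0).foldl
              (fun d (p : Int × String) => d.setdefault p.2 p.1) PySem.Dict.empty).getD t 0))
          (res, [])).1)
        PySem.Dict.empty).items.map (fun p => (p.1.1, p.1.2, p.2)) := rfl
  rw [hrfl]
  obtain ⟨hkeys, hget⟩ := pvFirst_fold xs 0 PySem.Dict.empty
  have hkeys' : ((PySem.List.enumerate xs 0).foldl
      (fun d (p : Int × String) => d.setdefault p.2 p.1) PySem.Dict.empty).keys =
      PySem.List.dedup xs := by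
    rw [hkeys, PySem.List.dedup_eq_ofList]
    exact PySem.Set.update_nil_left xs
  have hgetD : ∀ t ∈ xs, ((PySem.List.enumerate xs 0).foldl
      (fun d (p : Int × String) => d.setdefault p.2 p.1) PySem.Dict.empty).getD t 0 =
      (xs.idxOf t : Int) := by
    intro t ht
    rw [PySem.Dict.getD_eq_get?_getD, hget t, PySem.Dict.get?_empty,
      PySem.List.index?_eq_idxOf?, pvIdxOf?_eq_some xs t ht]
    simp
  rw [hkeys',
    pvB_rows xs _ _ (PySem.List.dedup xs) PySem.Dict.empty
      (by rw [PySem.List.dedup_eq_ofList]; exact PySem.Set.nodup_ofList _)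
      (fun t _ u => rfl)]
  have hempty : (PySem.Dict.empty : PySem.Dict (String × String) Int).items = [] := rfl
  rw [hempty, List.nil_append]
  congr 1
  apply List.flatMap_congr
  intro t ht
  have htxs : t ∈ xs := (PySem.List.mem_dedup _ _).1 ht
  rw [hgetD t htxs]
  have hrow : pvScanRow (PySem.List.enumerate xs 0) ((xs.idxOf t : Nat) : Int) [] =
      pvRowKeys xs t := rfl
  rw [hrow]
  apply List.map_congr_left
  intro u hu
  by_cases hut : u = t
  · rw [if_pos hut, if_pos hut, PySem.Dict.getD_counter]
  · rw [if_neg hut, if_neg hut, PySem.Dict.getD_counter]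
-- ===== VERDICT (by name: the statement is the Claim_ definition above) =====
theorem pair_counter_spec : Claim_equal_pair_counter := by
  intro list_line _
  show pair_counter list_line = pair_counter_alt list_line
  rw [pvA_items, pvB_items]
  congr 1
  unfold pvItems
  rw [List.take_length]
  apply List.flatMap_congr
  intro t ht
  apply List.map_congr_left
  intro u hu
  refine Prod.ext rfl ?_
  simp only []
  unfold pvVal
  by_cases hut : u = t
  · rw [if_pos hut, if_pos hut]
    have hcount : 2 ≤ list_line.count t :=
      pvDiag_two_le_count list_line t (hut ▸ hu)
    rw [List.take_length, if_pos hcount]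
  · rw [if_neg hut, if_neg hut]
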